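-- pv_equiv track=rewrite | github.com/Supergrammer/Algorithms | python/Algorithms_Python/Algorithms_Python/Programmers/[카카오인턴]보석쇼핑.py | solution
-- ===== SOURCE A (Python) =====
-- def solution(gems):
-- 	answer = [1, len(gems)]
-- 	branch = {}
--
-- 	for gem in gems:
-- 		if branch.get(gem):
-- 			continue
-- 		else:
-- 			branch[gem] = 0
--
-- 	gem = len(branch)
-- 	count = 1
-- 	left, right = 0, 0
-- 	branch[gems[0]] = 1
--
-- 	while left != len(gems) and right != len(gems):
-- 		if count == gem and answer[1] - answer[0] > right - left:
-- 			answer = [left + 1, right + 1]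
--
-- 		if count < gem:
-- 			right += 1
-- 			if right >= len(gems):
-- 				break
-- 			if branch[gems[right]] == 0:
-- 				count += 1
-- 			branch[gems[right]] += 1
-- 		else:
-- 			branch[gems[left]] -= 1
-- 			if branch[gems[left]] == 0:
-- 				count -= 1
-- 			left += 1
--
-- 	return answer
-- ===== SOURCE B (Python) =====
-- def solution(gems):
--     total = len(set(gems))
--     last = {}
--     best = [1, len(gems)]
--     for i, g in enumerate(gems):
--         last[g] = i
--         if len(last) == total:
--             start = min(last.values())
--             if best[1] - best[0] > i - start:
--                 best = [start + 1, i + 1]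
--     return best
-- ===== Notes on version B (the rewrite author's own statement) =====
-- stated objective: alternative
-- what changed: Replaces A's two-pointer shrinking-window loop over a counts dict by a single enumerate pass that keeps a last-occurrence dictionary: whenever every gem type has been seen, the shortest window ending at the current index starts at min(last occurrence per type), and the best strictly-shorter window is kept.
-- outside the precondition, e.g. on solution([]): A raises IndexError, B returns [1, 0]
import Mathlib
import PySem

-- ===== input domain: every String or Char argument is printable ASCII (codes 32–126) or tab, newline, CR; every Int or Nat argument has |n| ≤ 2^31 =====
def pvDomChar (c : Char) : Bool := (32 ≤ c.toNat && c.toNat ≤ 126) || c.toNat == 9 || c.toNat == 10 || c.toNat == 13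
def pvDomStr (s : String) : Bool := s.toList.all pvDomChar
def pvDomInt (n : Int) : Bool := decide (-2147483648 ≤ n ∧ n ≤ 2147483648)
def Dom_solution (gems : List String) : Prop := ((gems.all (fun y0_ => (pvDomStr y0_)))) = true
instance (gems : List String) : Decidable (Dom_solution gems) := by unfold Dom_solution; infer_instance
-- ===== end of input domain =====

-- B replaces A's shrinking-window loop by a last-occurrence dictionary: at each index the
-- shortest all-gems window ending there starts at min(last occurrence of each type);
-- objective: alternative algorithm (no asymptotic speed claim).

-- ===== PORT A =====
-- for gem in gems: if branch.get(gem): continue else: branch[gem] = 0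
-- (branch.get(gem) is None or 0 here, both falsy, so the else branch always runs)
def solutionBranchInit (gems : List String) : PySem.Dict String Int :=
  gems.foldl (fun d g => if (d.get? g).getD 0 ≠ 0 then d else d.insert g 0) PySem.Dict.empty

-- the while loop; left/right are the Python ints (always ≥ 0 here), fuel only makes the
-- loop total (each iteration moves left or right one step toward len(gems), so
-- 2*len(gems)+2 fuel is never exhausted); gems[...] indices are in range whenever read.
def solutionLoop (gems : List String) (gemk : Int) (fuel : Nat) (answer : Int × Int)
    (branch : PySem.Dict String Int) (count : Int) (left right : Nat) : Int × Int :=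
  match fuel with
  | 0 => answer
  | fuel + 1 =>
    if left = gems.length ∨ right = gems.length then answer
    else
      -- if count == gem and answer[1] - answer[0] > right - left: answer = [left+1, right+1]
      let answer := if count = gemk ∧ answer.2 - answer.1 > (right : Int) - (left : Int) then
        ((left : Int) + 1, (right : Int) + 1) else answer
      if count < gemk then
        let right := right + 1
        if gems.length ≤ right then answer
        else
          let g := PySem.List.pyGetD gems (right : Int) ""
          let count := if branch.getD g 0 = 0 then count + 1 else count
          solutionLoop gems gemk fuel answer (branch.insert g (branch.getD g 0 + 1)) count left right
      else
        let g := PySem.List.pyGetD gems (left : Int) ""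
        let branch := branch.insert g (branch.getD g 0 - 1)
        let count := if branch.getD g 0 = 0 then count - 1 else count
        solutionLoop gems gemk fuel answer branch count (left + 1) right

def solution (gems : List String) : List Int :=
  let answer : Int × Int := (1, (gems.length : Int))            -- answer = [1, len(gems)]
  let branch := solutionBranchInit gems
  let gemk : Int := (branch.size : Int)                          -- gem = len(branch)
  let branch := branch.insert (PySem.List.pyGetD gems 0 "") 1    -- branch[gems[0]] = 1 (IndexError on []: Pre_)
  let r := solutionLoop gems gemk (2 * gems.length + 2) answer branch 1 0 0
  [r.1, r.2]

-- ===== PORT B =====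
def solutionAltStep (total : Nat) (st : PySem.Dict String Int × (Int × Int)) (ig : Int × String) :
    PySem.Dict String Int × (Int × Int) :=
  let last := st.1.insert ig.2 ig.1                              -- last[g] = i
  if last.size = total then
    let start := (PySem.List.min? last.values (fun v => v)).getD 0   -- min(last.values()); nonempty here
    if st.2.2 - st.2.1 > ig.1 - start then (last, (start + 1, ig.1 + 1)) else (last, st.2)
  else (last, st.2)

def solution_alt (gems : List String) : List Int :=
  let total := (PySem.Set.ofList gems).length                    -- len(set(gems))
  let st := (PySem.List.enumerate gems 0).foldl (solutionAltStep total)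
    (PySem.Dict.empty, (1, (gems.length : Int)))                 -- best = [1, len(gems)]
  [st.2.1, st.2.2]

-- ===== PRECONDITION & SPEC =====
-- Pre_ excludes only the empty list, on which A raises IndexError at gems[0].
def Pre_solution (gems : List String) : Prop := gems ≠ []
instance (gems : List String) : Decidable (Pre_solution gems) := by unfold Pre_solution; infer_instance
def pvWitness_solution : List String := ["a", "b", "a"]

def Spec_solution (gems : List String) (out : List Int) : Prop := out = solution_alt gems
instance (gems : List String) (out : List Int) : Decidable (Spec_solution gems out) := by unfold Spec_solution; infer_instance

-- ===== CLAIM (what is proved, stated in full; the proofs are below) =====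
def Claim_equal_solution : Prop := ∀ (gems : List String), Dom_solution gems → Pre_solution gems → Spec_solution gems (solution gems)

-- ===== LEMMAS AND PROOFS =====


-- window gems[l..r] (inclusive), as a list
def pvWin (gems : List String) (l r : Nat) : List String := (gems.take (r+1)).drop l

-- B's last-occurrence dict after processing indices 0..r
def pvDlast (gems : List String) (r : Nat) : PySem.Dict String Int :=
  (PySem.List.enumerate (gems.take (r+1)) 0).foldl (fun d p => d.insert p.2 p.1) PySem.Dict.empty

def pvStart (gems : List String) (r : Nat) : Int :=
  (PySem.List.min? (pvDlast gems r).values (fun v => v)).getD 0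

abbrev pvFull (gems : List String) (r : Nat) : Prop := (gems.take (r+1)).toFinset = gems.toFinset

def pvTarget (gems : List String) (r : Nat) (ans : Int × Int) : Int × Int :=
  if pvFull gems r ∧ ans.2 - ans.1 > (r : Int) - pvStart gems r then (pvStart gems r + 1, (r : Int) + 1) else ans

def pvBfrom (gems : List String) (r : Nat) (best : Int × Int) : Int × Int :=
  (((PySem.List.enumerate gems 0).drop (r+1)).foldl (solutionAltStep ((PySem.Set.ofList gems).length))
    (pvDlast gems r, best)).2

-- ---- generic set/dict bookkeeping ----
lemma pv_set_len (xs : List String) : (PySem.Set.ofList xs).length = xs.toFinset.card := by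
  have h1 : (PySem.Set.ofList xs).toFinset = xs.toFinset := by
    ext g; simp [List.mem_toFinset, PySem.Set.mem_ofList]
  rw [← h1, List.toFinset_card_of_nodup (PySem.Set.nodup_ofList xs)]

lemma pv_init_fold (l : List String) (d : PySem.Dict String Int) (h0 : ∀ g, d.getD g 0 = 0) :
    l.foldl (fun d g => if (d.get? g).getD 0 ≠ 0 then d else d.insert g 0) d
      = l.foldl (fun d g => d.insert g 0) d := by
  induction l generalizing d with
  | nil => rfl
  | cons g l ih =>
    simp only [List.foldl_cons]
    have hz : (d.get? g).getD 0 = 0 := by rw [← PySem.Dict.getD_eq_get?_getD]; exact h0 g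
    rw [if_neg (by simp [hz])]
    exact ih _ (by intro g'; rw [PySem.Dict.getD_insert]; split_ifs with h; exacts [rfl, h0 g'])

lemma pv_zero_fold (l : List String) (d : PySem.Dict String Int) (h0 : ∀ g, d.getD g 0 = 0)
    (g : String) : (l.foldl (fun d g => d.insert g 0) d).getD g 0 = 0 := by
  induction l generalizing d with
  | nil => exact h0 g
  | cons x l ih =>
    simp only [List.foldl_cons]
    exact ih _ (by intro g'; rw [PySem.Dict.getD_insert]; split_ifs with h; exacts [rfl, h0 g'])

lemma pv_branchInit_getD (gems : List String) (g : String) : (solutionBranchInit gems).getD g 0 = 0 := by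
  unfold solutionBranchInit
  rw [pv_init_fold gems PySem.Dict.empty (by intro g'; simp [PySem.Dict.getD_empty])]
  exact pv_zero_fold gems PySem.Dict.empty (by intro g'; simp [PySem.Dict.getD_empty]) g

lemma pv_branchInit_size (gems : List String) :
    (solutionBranchInit gems).size = (PySem.Set.ofList gems).length := by
  unfold solutionBranchInit
  rw [pv_init_fold gems PySem.Dict.empty (by intro g'; simp [PySem.Dict.getD_empty])]
  have hk := PySem.Dict.keys_foldl_insert gems (fun _ _ => (0 : Int)) PySem.Dict.empty
  have hsz : ∀ d : PySem.Dict String Int, d.size = d.keys.length := by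
    intro d; simp [PySem.Dict.size, PySem.Dict.keys]
  rw [hsz, hk]
  rfl

-- ---- window structure ----
lemma pv_win_cons (gems : List String) (l r : Nat) (hl : l ≤ r) (hr : r < gems.length) :
    pvWin gems l r = gems[l]'(by omega) :: pvWin gems (l+1) r := by
  unfold pvWin
  have hlen : l < (gems.take (r+1)).length := by
    rw [List.length_take_of_le (by omega)]; omega
  rw [List.drop_eq_getElem_cons hlen, List.getElem_take]

lemma pv_win_snoc (gems : List String) (l r : Nat) (hr : r + 1 < gems.length) (hl : l ≤ r + 1) :
    pvWin gems l (r+1) = pvWin gems l r ++ [gems[r+1]'hr] := by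
  unfold pvWin
  have h2 : gems.take (r+1+1) = gems.take (r+1) ++ [gems[r+1]'hr] := by
    rw [List.take_add_one]; simp [List.getElem?_eq_getElem hr]
  rw [h2, List.drop_append_of_le_length (by rw [List.length_take_of_le (by omega)]; omega)]

lemma pv_mem_win (gems : List String) (l r : Nat) (_hr : r < gems.length) (g : String) :
    g ∈ pvWin gems l r ↔ ∃ j : Nat, l ≤ j ∧ j ≤ r ∧ gems[j]? = some g := by
  unfold pvWin
  rw [List.mem_iff_getElem?]
  constructor
  · rintro ⟨i, hi⟩
    rw [List.getElem?_drop, List.getElem?_take] at hi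
    refine ⟨l + i, by omega, ?_, ?_⟩
    · by_contra hgt; rw [if_neg (by omega)] at hi; simp at hi
    · split_ifs at hi with h; exact hi
  · rintro ⟨j, hlj, hjr, hj⟩
    refine ⟨j - l, ?_⟩
    rw [List.getElem?_drop, List.getElem?_take, if_pos (by omega)]
    rw [Nat.add_sub_cancel' hlj]; exact hj

lemma pv_win_subset (gems : List String) (l r : Nat) : (pvWin gems l r).toFinset ⊆ gems.toFinset := by
  intro x hx
  rw [List.mem_toFinset] at *
  exact List.take_subset _ _ (List.drop_subset _ _ hx)

lemma pv_full_succ (gems : List String) (r : Nat) (h : pvFull gems r) : pvFull gems (r+1) := by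
  unfold pvFull at *
  apply subset_antisymm
  · intro x hx; rw [List.mem_toFinset] at *; exact List.take_subset _ _ hx
  · rw [← h]
    intro x hx; rw [List.mem_toFinset] at *
    exact List.take_subset_take_left gems (by omega) hx

-- ---- the last-occurrence dict ----
lemma pv_dlast_succ (gems : List String) (r : Nat) (h : r + 1 < gems.length) :
    pvDlast gems (r+1) = (pvDlast gems r).insert (gems[r+1]'h) ((r : Int) + 1) := by
  unfold pvDlast
  have h2 : gems.take (r+1+1) = gems.take (r+1) ++ [gems[r+1]'h] := by
    rw [List.take_add_one]; simp [List.getElem?_eq_getElem h]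
  rw [h2, PySem.List.enumerate_append, List.foldl_append]
  simp [PySem.List.enumerate, List.length_take_of_le (show r + 1 ≤ gems.length by omega)]

lemma pv_dlast_keys (gems : List String) (r : Nat) :
    (pvDlast gems r).keys = PySem.Set.ofList (gems.take (r+1)) := by
  unfold pvDlast
  have hk := PySem.Dict.keys_foldl_insert_key (ν := Int)
    (PySem.List.enumerate (gems.take (r+1)) 0) (fun p => p.2) (fun _ p => p.1) PySem.Dict.empty
  simp only [PySem.List.map_snd_enumerate] at hk
  exact hk.trans (by rfl)

lemma pv_dlast_nodup (gems : List String) (r : Nat) : (pvDlast gems r).keys.Nodup := by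
  unfold pvDlast
  exact PySem.Dict.nodup_keys_foldl_insert_key (ν := Int)
    (PySem.List.enumerate (gems.take (r+1)) 0) (fun p => p.2) (fun _ p => p.1) PySem.Dict.empty
    (by simp [PySem.Dict.keys_empty])

lemma pv_dlast_size (gems : List String) (r : Nat) :
    (pvDlast gems r).size = (gems.take (r+1)).toFinset.card := by
  have hsz : (pvDlast gems r).size = (pvDlast gems r).keys.length := by
    simp [PySem.Dict.size, PySem.Dict.keys]
  rw [hsz, pv_dlast_keys, pv_set_len]

-- every stored value is its key's LAST occurrence index in gems[0..r]
lemma pv_dlast_occ (gems : List String) (r : Nat) (hr : r < gems.length) (g : String) (i : Int)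
    (h : (pvDlast gems r).get? g = some i) :
    ∃ j : Nat, i = (j : Int) ∧ j ≤ r ∧ gems[j]? = some g ∧
      ∀ j' : Nat, j < j' → j' ≤ r → gems[j']? ≠ some g := by
  induction r generalizing i with
  | zero =>
    unfold pvDlast at h
    have h1 : gems.take 1 = [gems[0]'hr] := by
      rw [show (1:Nat) = 0 + 1 from rfl, List.take_add_one]
      simp [List.getElem?_eq_getElem hr]
    rw [h1] at h
    simp only [PySem.List.enumerate, List.foldl] at h
    rw [PySem.Dict.get?_insert] at h
    split_ifs at h with hg
    · refine ⟨0, by simpa using h.symm, le_refl 0, by simp [hg, List.getElem?_eq_getElem hr], ?_⟩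
      intro j' h1 h2; omega
    · simp [PySem.Dict.get?_empty] at h
  | succ r ih =>
    rw [pv_dlast_succ gems r hr, PySem.Dict.get?_insert] at h
    split_ifs at h with hg
    · refine ⟨r+1, by simpa using h.symm, le_refl _, by simp [hg, List.getElem?_eq_getElem hr], ?_⟩
      intro j' h1 h2; omega
    · obtain ⟨j, hij, hjr, hocc, hmax⟩ := ih (by omega) i h
      refine ⟨j, hij, by omega, hocc, ?_⟩
      intro j' h1 h2
      rcases Nat.lt_or_ge j' (r+1) with hc | hc
      · exact hmax j' h1 (by omega)
      · have : j' = r + 1 := by omega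
        subst this
        rw [List.getElem?_eq_getElem hr]
        intro hcon
        exact hg (by simpa using hcon.symm)

lemma pv_dlast_contains (gems : List String) (r : Nat) (g : String) (h : g ∈ gems.take (r+1)) :
    ∃ i, (pvDlast gems r).get? g = some i := by
  have hm : g ∈ (pvDlast gems r).keys := by
    rw [pv_dlast_keys, PySem.Set.mem_ofList]; exact h
  have := PySem.Dict.get?_eq_none_iff_not_mem_keys (d := pvDlast gems r) (k := g)
  rcases ho : (pvDlast gems r).get? g with _ | i
  · exact absurd (this.mp ho) (by simpa using hm)
  · exact ⟨i, rfl⟩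

lemma pv_value_get? (gems : List String) (r : Nat) (v : Int) (h : v ∈ (pvDlast gems r).values) :
    ∃ g, (pvDlast gems r).get? g = some v := by
  have hv : v ∈ (pvDlast gems r).items.map (fun p => p.2) := by
    simpa [PySem.Dict.values] using h
  rw [List.mem_map] at hv
  obtain ⟨⟨g, v'⟩, hmem, hv'⟩ := hv
  subst hv'
  exact ⟨g, (PySem.Dict.get?_eq_some_iff_mem_items _ _ _ (pv_dlast_nodup gems r)).mpr hmem⟩

lemma pv_get?_value (gems : List String) (r : Nat) (g : String) (v : Int)
    (h : (pvDlast gems r).get? g = some v) : v ∈ (pvDlast gems r).values := by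
  have hm := PySem.Dict.mem_items_of_get?_eq_some _ h
  show v ∈ (pvDlast gems r).items.map (fun p => p.2)
  exact List.mem_map.mpr ⟨(g, v), hm, rfl⟩

-- ---- the start (min of last occurrences) ----
lemma pv_start_some (gems : List String) (r : Nat) (hne : gems ≠ []) :
    PySem.List.min? (pvDlast gems r).values (fun v => v) = some (pvStart gems r) := by
  have hne' : (pvDlast gems r).values ≠ [] := by
    intro hv
    have hk : (pvDlast gems r).keys = [] := by
      simp only [PySem.Dict.keys, PySem.Dict.values] at *
      simpa using congrArg List.length hv
    have h0 : gems[0]? = some (gems.headI) := by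
      cases gems with
      | nil => exact absurd rfl hne
      | cons x t => rfl
    have hmem : gems.headI ∈ gems.take (r+1) := by
      rw [List.mem_iff_getElem?]
      exact ⟨0, by rw [List.getElem?_take, if_pos (by omega)]; exact h0⟩
    obtain ⟨i, hi⟩ := pv_dlast_contains gems r _ hmem
    have := PySem.Dict.get?_eq_none_iff_not_mem_keys (d := pvDlast gems r) (k := gems.headI)
    rw [hk] at this
    rw [this.mpr (by simp)] at hi
    simp at hi
  rcases hmin : PySem.List.min? (pvDlast gems r).values (fun v => v) with _ | m
  · exact absurd ((PySem.List.min?_eq_none_iff _ _).mp hmin) hne'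
  · unfold pvStart; rw [hmin]; rfl

lemma pv_start_bounds (gems : List String) (r : Nat) (hne : gems ≠ []) (hr : r < gems.length) :
    0 ≤ pvStart gems r ∧ pvStart gems r ≤ (r : Int) := by
  have hmem := PySem.List.min?_mem (pv_start_some gems r hne)
  obtain ⟨g, hg⟩ := pv_value_get? gems r _ hmem
  obtain ⟨j, hij, hjr, _, _⟩ := pv_dlast_occ gems r hr g _ hg
  rw [hij]
  constructor
  · positivity
  · exact_mod_cast hjr

lemma pv_start_le (gems : List String) (r : Nat) (hne : gems ≠ []) (g : String) (i : Int)
    (h : (pvDlast gems r).get? g = some i) : pvStart gems r ≤ i := by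
  exact PySem.List.min?_isMin (pv_start_some gems r hne) i (pv_get?_value gems r g i h)

lemma pv_start_mono (gems : List String) (r : Nat) (hne : gems ≠ []) (h : r + 1 < gems.length) :
    pvStart gems r ≤ pvStart gems (r+1) := by
  have hmem := PySem.List.min?_mem (pv_start_some gems (r+1) hne)
  rw [pv_dlast_succ gems r h] at hmem
  rcases PySem.Dict.mem_values_insert _ _ _ _ hmem with h1 | h1
  · rw [h1]
    have := (pv_start_bounds gems r hne (by omega)).2
    omega
  · obtain ⟨g, hg⟩ := pv_value_get? gems r _ h1
    exact pv_start_le gems r hne g _ hg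

-- the window gems[l..r] contains every distinct gem iff the prefix does and l ≤ start r
lemma pv_winfull_iff (gems : List String) (l r : Nat) (hne : gems ≠ []) (hr : r < gems.length)
    (_hl : l ≤ r + 1) :
    (pvWin gems l r).toFinset = gems.toFinset ↔ (pvFull gems r ∧ (l : Int) ≤ pvStart gems r) := by
  constructor
  · intro h
    have hfull : pvFull gems r := by
      unfold pvFull
      apply subset_antisymm
      · intro x hx; rw [List.mem_toFinset] at *; exact List.take_subset _ _ hx
      · rw [← h]
        intro x hx; rw [List.mem_toFinset] at *
        exact List.drop_subset _ _ hx
    refine ⟨hfull, ?_⟩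
    have hmem := PySem.List.min?_mem (pv_start_some gems r hne)
    obtain ⟨g₀, hg₀⟩ := pv_value_get? gems r _ hmem
    obtain ⟨j₀, hij, hjr, hocc, hmax⟩ := pv_dlast_occ gems r hr g₀ _ hg₀
    have hg₀win : g₀ ∈ pvWin gems l r := by
      rw [← List.mem_toFinset, h, List.mem_toFinset]
      exact List.mem_of_getElem? hocc
    obtain ⟨j, hlj, hjr', hj⟩ := (pv_mem_win gems l r hr g₀).mp hg₀win
    have hjle : j ≤ j₀ := by
      by_contra hgt
      exact hmax j (by omega) hjr' hj
    rw [hij]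
    omega
  · rintro ⟨hfull, hls⟩
    apply subset_antisymm
    · exact pv_win_subset gems l r
    · intro g hg
      rw [List.mem_toFinset] at hg
      have hgtake : g ∈ gems.take (r+1) := by
        rw [← List.mem_toFinset, hfull]
        rw [List.mem_toFinset]; exact hg
      obtain ⟨i, hi⟩ := pv_dlast_contains gems r g hgtake
      obtain ⟨j, hij, hjr, hocc, _⟩ := pv_dlast_occ gems r hr g _ hi
      have hsle := pv_start_le gems r hne g _ hi
      rw [List.mem_toFinset]
      refine (pv_mem_win gems l r hr g).mpr ⟨j, ?_, hjr, hocc⟩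
      rw [hij] at hsle
      omega

-- ---- B's fold, peeled one index at a time ----
lemma pv_size_iff (gems : List String) (r : Nat) :
    ((pvDlast gems r).size = (PySem.Set.ofList gems).length) ↔ pvFull gems r := by
  rw [pv_dlast_size, pv_set_len]
  constructor
  · intro hcard
    exact Finset.eq_of_subset_of_card_le
      (by intro x hx; rw [List.mem_toFinset] at *; exact List.take_subset _ _ hx) (le_of_eq hcard.symm)
  · intro hf; rw [hf]

lemma pv_bfrom_succ (gems : List String) (r : Nat) (h : r + 1 < gems.length) (best : Int × Int) :
    pvBfrom gems r best
      = pvBfrom gems (r+1) (if pvFull gems (r+1) ∧ best.2 - best.1 > ((r : Int) + 1) - pvStart gems (r+1)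
          then (pvStart gems (r+1) + 1, (r : Int) + 2) else best) := by
  unfold pvBfrom
  have hdrop : (PySem.List.enumerate gems 0).drop (r+1)
      = ((r:Int)+1, gems[r+1]'h) :: (PySem.List.enumerate gems 0).drop (r+2) := by
    rw [List.drop_eq_getElem_cons (by rw [PySem.List.length_enumerate]; omega)]
    congr 1
    rw [PySem.List.getElem_enumerate]
    norm_num
  rw [hdrop, List.foldl_cons]
  congr 2
  show solutionAltStep _ _ _ = _
  unfold solutionAltStep
  simp only
  rw [← pv_dlast_succ gems r h]
  by_cases hf : pvFull gems (r+1)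
  · rw [if_pos ((pv_size_iff gems (r+1)).mpr hf)]
    have hstart : (PySem.List.min? (pvDlast gems (r+1)).values (fun v => v)).getD 0
        = pvStart gems (r+1) := rfl
    rw [hstart]
    by_cases hc : best.2 - best.1 > ((r:Int)+1) - pvStart gems (r+1)
    · rw [if_pos hc, if_pos ⟨hf, by exact_mod_cast hc⟩]
      norm_num; ring
    · rw [if_neg hc, if_neg (by rintro ⟨_, hc'⟩; exact hc (by exact_mod_cast hc'))]
  · rw [if_neg (fun hsz => hf ((pv_size_iff gems (r+1)).mp hsz)),
      if_neg (fun hand => hf hand.1)]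

lemma pv_bfrom_last (gems : List String) (r : Nat) (h : r + 1 = gems.length) (best : Int × Int) :
    pvBfrom gems r best = best := by
  unfold pvBfrom
  rw [List.drop_eq_nil_of_le (by rw [PySem.List.length_enumerate]; omega)]
  rfl

lemma pv_dlast_zero (gems : List String) (h : 0 < gems.length) :
    pvDlast gems 0 = PySem.Dict.empty.insert (gems[0]'h) 0 := by
  unfold pvDlast
  have h1 : gems.take 1 = [gems[0]'h] := by
    rw [show (1:Nat) = 0 + 1 from rfl, List.take_add_one]
    simp [List.getElem?_eq_getElem h]
  rw [h1]
  rfl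

lemma pv_alt_eq (gems : List String) (hne : gems ≠ []) :
    solution_alt gems = [(pvBfrom gems 0 (pvTarget gems 0 (1, (gems.length : Int)))).1,
                        (pvBfrom gems 0 (pvTarget gems 0 (1, (gems.length : Int)))).2] := by
  have h0 : 0 < gems.length := List.length_pos_iff.mpr hne
  unfold solution_alt
  simp only
  have hd : PySem.List.enumerate gems 0 = ((0:Int), gems[0]'h0) :: (PySem.List.enumerate gems 0).drop 1 := by
    conv_lhs => rw [← List.drop_zero (l := PySem.List.enumerate gems 0)]
    rw [List.drop_eq_getElem_cons (by rw [PySem.List.length_enumerate]; omega)]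
    congr 1
    rw [PySem.List.getElem_enumerate]
    norm_num
  rw [hd, List.foldl_cons]
  have hstep : solutionAltStep ((PySem.Set.ofList gems).length)
      (PySem.Dict.empty, (1, (gems.length : Int))) ((0:Int), gems[0]'h0)
      = (pvDlast gems 0, pvTarget gems 0 (1, (gems.length : Int))) := by
    unfold solutionAltStep
    simp only
    rw [← pv_dlast_zero gems h0]
    unfold pvTarget
    by_cases hf : pvFull gems 0
    · rw [if_pos ((pv_size_iff gems 0).mpr hf)]
      have hstart : (PySem.List.min? (pvDlast gems 0).values (fun v => v)).getD 0
          = pvStart gems 0 := rfl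
      rw [hstart]
      by_cases hc : (gems.length : Int) - 1 > (0:Int) - pvStart gems 0
      · rw [if_pos hc, if_pos ⟨hf, by exact_mod_cast hc⟩]
        norm_num
      · rw [if_neg hc, if_neg (by rintro ⟨_, hc'⟩; exact hc (by exact_mod_cast hc'))]
    · rw [if_neg (fun hsz => hf ((pv_size_iff gems 0).mp hsz)),
        if_neg (fun hand => hf hand.1)]
  rw [hstep]
  rfl

lemma pv_target_eq_self (gems : List String) (r : Nat) (answer : Int × Int)
    (h : pvFull gems r → answer.2 - answer.1 ≤ (r : Int) - pvStart gems r) :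
    pvTarget gems r answer = answer := by
  unfold pvTarget
  rw [if_neg]
  rintro ⟨hf, hgt⟩
  have := h hf
  omega

-- ---- the main simulation: A's while loop equals B's remaining fold ----
lemma pvMain (gems : List String) (hne : gems ≠ []) (fuel : Nat) :
    ∀ (r left : Nat) (answer : Int × Int) (branch : PySem.Dict String Int) (count : Int),
    r < gems.length →
    (∀ g, branch.getD g 0 = ((pvWin gems left r).count g : Int)) →
    count = ((pvWin gems left r).toFinset.card : Int) →
    ((pvFull gems r ∧ (left : Int) ≤ pvStart gems r + 1) ∨ (¬ pvFull gems r ∧ left = 0)) →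
    (pvFull gems r → (left : Int) = pvStart gems r + 1 →
      answer.2 - answer.1 ≤ (r : Int) - pvStart gems r) →
    (gems.length - left) + (gems.length - r) + 1 ≤ fuel →
    solutionLoop gems ((gems.toFinset.card : Int)) fuel answer branch count left r
      = pvBfrom gems r (pvTarget gems r answer) := by
  induction fuel with
  | zero => intro r left answer branch count _ _ _ _ _ hfuel; omega
  | succ fuel ih =>
    intro r left answer branch count hr hbranch hcount hli hai hfuel
    have hne' : 0 < gems.length := List.length_pos_iff.mpr hne
    have hsb := pv_start_bounds gems r hne hr
    have hl_le : left ≤ r + 1 := by rcases hli with ⟨hf, hle⟩ | ⟨hnf, h0⟩ <;> omega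
    simp only [solutionLoop]
    by_cases hstop : left = gems.length ∨ r = gems.length
    · rw [if_pos hstop]
      rcases hli with ⟨hf, hle⟩ | ⟨hnf, h0⟩
      · have hn : left = gems.length := by rcases hstop with h | h; exacts [h, absurd h (by omega)]
        have hr1 : r + 1 = gems.length := by omega
        have hst : pvStart gems r = (r : Int) := by omega
        rw [pv_bfrom_last gems r hr1, pv_target_eq_self gems r answer
          (fun hf' => by have := hai hf' (by omega); omega)]
      · exfalso; rcases hstop with h | h <;> omega
    · rw [if_neg hstop]
      by_cases hfw : (pvWin gems left r).toFinset = gems.toFinset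
      · -- the window is full: A records (maybe) and shrinks from the left
        have hcnt : count = ((gems.toFinset.card : Nat) : Int) := by rw [hcount, hfw]
        obtain ⟨hf, hls⟩ := (pv_winfull_iff gems left r hne hr hl_le).mp hfw
        have hlr : left ≤ r := by omega
        have hlt : left < gems.length := by omega
        have hnotlt : ¬ count < ((gems.toFinset.card : Nat) : Int) := by rw [hcnt]; exact lt_irrefl _
        rw [if_neg hnotlt]
        have hget : PySem.List.pyGetD gems ((left : Nat) : Int) "" = gems[left]'hlt := by
          rw [PySem.List.pyGetD_natCast]; exact List.getD_eq_getElem gems "" hlt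
        rw [hget]
        have hwin_cons := pv_win_cons gems left r hlr hr
        have hcnt_tail : ∀ x, (pvWin gems left r).count x
            = (pvWin gems (left+1) r).count x + if x = gems[left]'hlt then 1 else 0 := by
          intro x; rw [hwin_cons]
          rcases eq_or_ne x (gems[left]'hlt) with h | h
          · rw [h, List.count_cons_self, if_pos rfl]
          · rw [List.count_cons_of_ne (Ne.symm h), if_neg h]; omega
        have hbranch' : ∀ g', ((branch.insert (gems[left]'hlt)
              (branch.getD (gems[left]'hlt) 0 - 1)).getD g' 0)
            = ((pvWin gems (left+1) r).count g' : Int) := by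
          intro g'
          rw [PySem.Dict.getD_insert]
          split_ifs with hgg
          · rw [hbranch, hcnt_tail (gems[left]'hlt)]
            subst hgg; push_cast; simp
          · rw [hbranch g', hcnt_tail g', if_neg hgg]; push_cast; ring
        have hcount' : (if (branch.insert (gems[left]'hlt) (branch.getD (gems[left]'hlt) 0 - 1)).getD
              (gems[left]'hlt) 0 = 0 then count - 1 else count)
            = (((pvWin gems (left+1) r).toFinset.card : Nat) : Int) := by
          rw [hbranch' (gems[left]'hlt)]
          have hcard : (pvWin gems left r).toFinset = insert (gems[left]'hlt) (pvWin gems (left+1) r).toFinset := by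
            rw [hwin_cons]; simp
          by_cases hgm : (gems[left]'hlt) ∈ pvWin gems (left+1) r
          · rw [if_neg (by simpa [List.count_eq_zero] using hgm)]
            rw [hcount, hcard, Finset.card_insert_of_mem (List.mem_toFinset.mpr hgm)]
          · rw [if_pos (by simpa [List.count_eq_zero] using hgm)]
            rw [hcount, hcard, Finset.card_insert_of_notMem (by simpa [List.mem_toFinset] using hgm)]
            push_cast; ring
        have hai' : pvFull gems r → ((left + 1 : Nat) : Int) = pvStart gems r + 1 →
            (if count = ((gems.toFinset.card : Nat) : Int)
                ∧ answer.2 - answer.1 > (r : Int) - (left : Int)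
              then (((left : Nat) : Int) + 1, ((r : Nat) : Int) + 1) else answer).2
            - (if count = ((gems.toFinset.card : Nat) : Int)
                ∧ answer.2 - answer.1 > (r : Int) - (left : Int)
              then (((left : Nat) : Int) + 1, ((r : Nat) : Int) + 1) else answer).1
            ≤ (r : Int) - pvStart gems r := by
          intro hf' hleq
          by_cases hc : answer.2 - answer.1 > (r : Int) - (left : Int)
          · rw [if_pos ⟨hcnt, hc⟩]; push_cast at hleq ⊢; omega
          · rw [if_neg (by rintro ⟨_, h⟩; exact hc h)]; push_cast at hleq; omega
        rw [ih r (left+1) _ _ _ hr hbranch' hcount'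
          (Or.inl ⟨hf, by omega⟩) hai' (by omega)]
        congr 1
        by_cases hc : answer.2 - answer.1 > (r : Int) - (left : Int)
        · rw [if_pos ⟨hcnt, hc⟩]
          have h1 : pvTarget gems r answer = (pvStart gems r + 1, (r : Int) + 1) := by
            unfold pvTarget; rw [if_pos ⟨hf, by omega⟩]
          have h2 : pvTarget gems r (((left : Nat) : Int) + 1, ((r : Nat) : Int) + 1)
              = (pvStart gems r + 1, (r : Int) + 1) := by
            unfold pvTarget
            by_cases hlts : (left : Int) < pvStart gems r
            · rw [if_pos ⟨hf, by simp; omega⟩]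
            · rw [if_neg (by rintro ⟨_, h⟩; simp at h; omega)]
              rw [Prod.ext_iff]
              refine ⟨by simp; omega, by simp⟩
          rw [h1, h2]
        · rw [if_neg (by rintro ⟨_, h⟩; exact hc h)]
      · -- the window is not full: A extends to the right
        have hclt : ((pvWin gems left r).toFinset.card) < gems.toFinset.card :=
          Finset.card_lt_card (ssubset_iff_subset_ne.mpr ⟨pv_win_subset gems left r, hfw⟩)
        have hrec : ¬ (count = ((gems.toFinset.card : Nat) : Int)
            ∧ answer.2 - answer.1 > (r : Int) - (left : Int)) := by
          rintro ⟨hceq, _⟩; rw [hcount] at hceq; omega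
        rw [if_neg hrec, if_pos (by rw [hcount]; exact_mod_cast hclt)]
        have htr : pvTarget gems r answer = answer := by
          apply pv_target_eq_self
          intro hf'
          rcases hli with ⟨hf, hls⟩ | ⟨hnf, _⟩
          · have hgt : pvStart gems r < (left : Int) := by
              by_contra hle
              exact hfw ((pv_winfull_iff gems left r hne hr hl_le).mpr ⟨hf, by omega⟩)
            exact hai hf (by omega)
          · exact absurd hf' hnf
        by_cases hrend : gems.length ≤ r + 1
        · rw [if_pos hrend, pv_bfrom_last gems r (by omega), htr]
        · rw [if_neg hrend]
          have hr2 : r + 1 < gems.length := by omega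
          have hget2 : PySem.List.pyGetD gems (((r + 1 : Nat)) : Int) "" = gems[r+1]'hr2 := by
            rw [PySem.List.pyGetD_natCast]; exact List.getD_eq_getElem gems "" hr2
          rw [hget2]
          have hsnoc := pv_win_snoc gems left r hr2 hl_le
          have hcnt_snoc : ∀ x, (pvWin gems left (r+1)).count x
              = (pvWin gems left r).count x + if x = gems[r+1]'hr2 then 1 else 0 := by
            intro x; rw [hsnoc]
            rcases eq_or_ne x (gems[r+1]'hr2) with h | h
            · rw [h, if_pos rfl]; simp [List.count_append]
            · rw [if_neg h]; simp [List.count_append, Ne.symm h]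
          have hbranch'' : ∀ g', ((branch.insert (gems[r+1]'hr2)
                (branch.getD (gems[r+1]'hr2) 0 + 1)).getD g' 0)
              = ((pvWin gems left (r+1)).count g' : Int) := by
            intro g'
            rw [PySem.Dict.getD_insert]
            split_ifs with hgg
            · rw [hgg, hbranch (gems[r+1]'hr2), hcnt_snoc (gems[r+1]'hr2), if_pos rfl]
              push_cast; ring
            · rw [hbranch g', hcnt_snoc g', if_neg hgg]; push_cast; ring
          have hcard : (pvWin gems left (r+1)).toFinset
              = insert (gems[r+1]'hr2) (pvWin gems left r).toFinset := by
            rw [hsnoc]; simp [List.toFinset_append]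
          have hcount'' : (if branch.getD (gems[r+1]'hr2) 0 = 0 then count + 1 else count)
              = (((pvWin gems left (r+1)).toFinset.card : Nat) : Int) := by
            rw [hbranch (gems[r+1]'hr2)]
            by_cases hgm : (gems[r+1]'hr2) ∈ pvWin gems left r
            · rw [if_neg (by simpa [List.count_eq_zero] using hgm)]
              rw [hcount, hcard, Finset.card_insert_of_mem (List.mem_toFinset.mpr hgm)]
            · rw [if_pos (by simpa [List.count_eq_zero] using hgm)]
              rw [hcount, hcard, Finset.card_insert_of_notMem (by simpa [List.mem_toFinset] using hgm)]
              push_cast; ring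
          have hli'' : (pvFull gems (r+1) ∧ (left : Int) ≤ pvStart gems (r+1) + 1)
              ∨ (¬ pvFull gems (r+1) ∧ left = 0) := by
            by_cases hf1 : pvFull gems (r+1)
            · refine Or.inl ⟨hf1, ?_⟩
              rcases hli with ⟨hf, hls⟩ | ⟨_, h0⟩
              · have := pv_start_mono gems r hne hr2; omega
              · have := (pv_start_bounds gems (r+1) hne hr2).1; omega
            · refine Or.inr ⟨hf1, ?_⟩
              rcases hli with ⟨hf, _⟩ | ⟨_, h0⟩
              · exact absurd (pv_full_succ gems r hf) hf1
              · exact h0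
          have hai'' : pvFull gems (r+1) → (left : Int) = pvStart gems (r+1) + 1 →
              answer.2 - answer.1 ≤ ((r+1 : Nat) : Int) - pvStart gems (r+1) := by
            intro hf1 hleq
            rcases hli with ⟨hf, hls⟩ | ⟨_, h0⟩
            · have hmono := pv_start_mono gems r hne hr2
              have hgt : pvStart gems r < (left : Int) := by
                by_contra hle
                exact hfw ((pv_winfull_iff gems left r hne hr hl_le).mpr ⟨hf, by omega⟩)
              have heq : pvStart gems (r+1) = pvStart gems r := by omega
              have := hai hf (by omega)
              push_cast; omega
            · have := (pv_start_bounds gems (r+1) hne hr2).1; omega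
          rw [ih (r+1) left _ _ _ (by omega) hbranch'' hcount'' hli'' hai'' (by omega)]
          rw [pv_bfrom_succ gems r hr2 (pvTarget gems r answer), htr]
          congr 1

-- ===== VERDICT (by name: the statement is the Claim_ definition above) =====
theorem solution_spec : Claim_equal_solution := by
  intro gems _hdom hne
  unfold Spec_solution
  have h0 : 0 < gems.length := List.length_pos_iff.mpr hne
  have hget0 : PySem.List.pyGetD gems 0 "" = gems[0]'h0 := by
    rw [show (0 : Int) = ((0 : Nat) : Int) from rfl, PySem.List.pyGetD_natCast]
    exact List.getD_eq_getElem gems "" h0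
  have hksz : (((solutionBranchInit gems).size : Nat) : Int) = ((gems.toFinset.card : Nat) : Int) := by
    rw [pv_branchInit_size, pv_set_len]
  have htake1 : gems.take 1 = [gems[0]'h0] := by
    rw [show (1 : Nat) = 0 + 1 from rfl, List.take_add_one]
    simp [List.getElem?_eq_getElem h0]
  have hwin00 : pvWin gems 0 0 = [gems[0]'h0] := by unfold pvWin; rw [htake1]; rfl
  have hb : ∀ g, ((solutionBranchInit gems).insert (gems[0]'h0) 1).getD g 0
      = (((pvWin gems 0 0).count g : Nat) : Int) := by
    intro g
    rw [PySem.Dict.getD_insert, hwin00]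
    split_ifs with hgg
    · subst hgg; simp
    · rw [pv_branchInit_getD]
      have hgg' : ¬ (gems[0]'h0) = g := fun h => hgg h.symm
      simp [hgg']
  have hc : (1 : Int) = (((pvWin gems 0 0).toFinset.card : Nat) : Int) := by rw [hwin00]; simp
  have hli : (pvFull gems 0 ∧ ((0 : Nat) : Int) ≤ pvStart gems 0 + 1)
      ∨ (¬ pvFull gems 0 ∧ (0 : Nat) = 0) := by
    by_cases hf : pvFull gems 0
    · exact Or.inl ⟨hf, by have := (pv_start_bounds gems 0 hne h0).1; omega⟩
    · exact Or.inr ⟨hf, rfl⟩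
  have hai : pvFull gems 0 → ((0 : Nat) : Int) = pvStart gems 0 + 1 →
      ((1 : Int), (gems.length : Int)).2 - ((1 : Int), (gems.length : Int)).1
        ≤ ((0 : Nat) : Int) - pvStart gems 0 := by
    intro _ heq
    have := (pv_start_bounds gems 0 hne h0).1
    omega
  have hmain := pvMain gems hne (2 * gems.length + 2) 0 0 (1, (gems.length : Int))
    ((solutionBranchInit gems).insert (gems[0]'h0) 1) 1 h0 hb hc hli hai (by omega)
  have hsol : solution gems
      = [(solutionLoop gems (((solutionBranchInit gems).size : Nat) : Int) (2 * gems.length + 2)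
          (1, (gems.length : Int)) ((solutionBranchInit gems).insert (gems[0]'h0) 1) 1 0 0).1,
         (solutionLoop gems (((solutionBranchInit gems).size : Nat) : Int) (2 * gems.length + 2)
          (1, (gems.length : Int)) ((solutionBranchInit gems).insert (gems[0]'h0) 1) 1 0 0).2] := by
    simp only [solution]
    rw [hget0]
  rw [hsol, hksz, hmain, pv_alt_eq gems hne]
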